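-- pv_equiv track=rewrite | github.com/himaja0007/Pancake-Search-using-LLMs | pancakeSearch.py | solvePancakeSortUninformed
-- ===== SOURCE A (Python) =====
-- from collections import deque
--
-- def flip(arr, i):
--     new_arr = arr[:i + 1][::-1] + arr[i + 1:]
--     return new_arr
--
-- def solvePancakeSortUninformed(input_array):
--     start = tuple(input_array)
--     goal = tuple(sorted(input_array))
--     queue = deque([(start, [])])
--     visited = {start}
--
--     while queue:
--         state, path = queue.popleft()
--         if state == goal:
--             return path
--         for i in range(len(state)):
--             new_state = tuple(flip(list(state), i))
--             if new_state not in visited: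
--                 visited.add(new_state)
--                 queue.append((new_state, path + [f"flip_{i}"]))
--     return []
-- ===== SOURCE B (Python) =====
-- from collections import deque
--
-- def solvePancakeSortUninformed(input_array):
--     # Same BFS frontier, but the queue holds bare states; the flip sequence is
--     # reconstructed from parent pointers only when the goal is dequeued.
--     start = tuple(input_array)
--     goal = tuple(sorted(input_array))
--     queue = deque([start])
--     parent = {start: None}
--
--     while queue:
--         state = queue.popleft()
--         if state == goal:
--             labels = []
--             cur = state
--             while parent[cur] is not None:
--                 prev, lab = parent[cur]
--                 labels.append(lab)
--                 cur = prev
--             labels.reverse()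
--             return labels
--         for i in range(len(state)):
--             new_state = tuple(reversed(state[:i + 1])) + state[i + 1:]
--             if new_state not in parent:
--                 parent[new_state] = (state, "flip_" + str(i))
--                 queue.append(new_state)
--     return []
-- ===== Notes on version B (the rewrite author's own statement) =====
-- stated objective: alternative
-- what changed: The BFS queue no longer carries a copied flip-path per entry; B enqueues bare states, records each discovery in a parent-pointer dict (state -> (predecessor, flip label)), and reconstructs the sequence by walking the pointers backwards from the goal and reversing.
import Mathlib
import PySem

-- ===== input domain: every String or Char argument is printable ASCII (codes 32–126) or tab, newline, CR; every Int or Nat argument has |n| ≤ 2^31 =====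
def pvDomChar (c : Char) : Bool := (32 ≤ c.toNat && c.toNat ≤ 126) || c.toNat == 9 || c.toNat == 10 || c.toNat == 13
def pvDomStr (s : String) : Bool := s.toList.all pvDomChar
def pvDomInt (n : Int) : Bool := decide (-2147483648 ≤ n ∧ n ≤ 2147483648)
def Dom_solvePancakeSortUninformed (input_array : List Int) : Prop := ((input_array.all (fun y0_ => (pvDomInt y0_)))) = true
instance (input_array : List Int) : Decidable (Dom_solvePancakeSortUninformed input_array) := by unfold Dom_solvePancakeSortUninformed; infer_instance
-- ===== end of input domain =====

-- B replaces the path threaded through the BFS queue by a parent-pointer dictionary with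
-- backward reconstruction at the goal (alternative decomposition; same BFS order and answers).


-- ===== PORT A =====
-- flip(arr, i) = arr[:i+1][::-1] + arr[i+1:]   ([::-1] is reverse: PySem.List.slice?_none_none_neg_one)
def pvFlip (arr : List Int) (i : Int) : List Int :=
  (PySem.List.slice arr none (some (i + 1))).reverse ++ PySem.List.slice arr (some (i + 1)) none

-- the while-loop of A; fuel bounds the number of iterations (the loop is finite: each iteration
-- pops one queue entry and enqueues only never-visited states, of which there are finitely many)
-- one pass of the inner 'for i in range(len(state))' of A
def pvStepA (state : List Int) (path : List String)
    (acc : List (List Int × List String) × PySem.Set (List Int)) (i : Int) :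
    List (List Int × List String) × PySem.Set (List Int) :=
  let ns := pvFlip state i
  if PySem.Set.contains acc.2 ns then acc
  else (acc.1 ++ [(ns, path ++ ["flip_" ++ PySem.Int.toStr i])], PySem.Set.add acc.2 ns)

def pvBfsA (goal : List Int) :
    Nat → List (List Int × List String) → PySem.Set (List Int) → List String
  | 0, _, _ => []
  | _ + 1, [], _ => []
  | fuel + 1, (state, path) :: rest, visited =>
    if state = goal then path
    else
      let step := (PySem.List.pyRange 0 (state.length : Int) 1).foldl (pvStepA state path) (rest, visited)
      pvBfsA goal fuel step.1 step.2

def solvePancakeSortUninformed (input_array : List Int) : List String :=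
  let start := input_array
  let goal := PySem.List.sorted input_array (fun x => x) false
  -- fuel: pops ≤ 1 + number of distinct states ever enqueued ≤ (n+1)^(n+1); never reached in Python
  pvBfsA goal ((input_array.length + 1) ^ (input_array.length + 1))
    [(start, [])] (PySem.Set.ofList [start])

-- ===== PORT B =====
-- the backward walk over parent pointers; fuel = number of keys of parent bounds the walk
-- (parent[cur] always hits a key in B; a missing key — Python's KeyError — cannot occur and stops the walk)
def pvRecon (parent : PySem.Dict (List Int) (Option (List Int × String))) :
    Nat → List Int → List String → List String
  | 0, _, labels => labels.reverse
  | fuel + 1, cur, labels =>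
    match parent.get? cur with
    | some (some (prev, lab)) => pvRecon parent fuel prev (labels ++ [lab])
    | _ => labels.reverse

-- one pass of the inner 'for i in range(len(state))' of B
def pvStepB (state : List Int)
    (acc : List (List Int) × PySem.Dict (List Int) (Option (List Int × String))) (i : Int) :
    List (List Int) × PySem.Dict (List Int) (Option (List Int × String)) :=
  -- tuple(reversed(state[:i+1])) + state[i+1:]
  let ns := (PySem.List.slice state none (some (i + 1))).reverse ++
            PySem.List.slice state (some (i + 1)) none
  if acc.2.contains ns then acc
  else (acc.1 ++ [ns], acc.2.insert ns (some (state, "flip_" ++ PySem.Int.toStr i)))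

-- the while-loop of B: bare states in the queue, discovery recorded in the parent dict
def pvBfsB (goal : List Int) :
    Nat → List (List Int) → PySem.Dict (List Int) (Option (List Int × String)) → List String
  | 0, _, _ => []
  | _ + 1, [], _ => []
  | fuel + 1, state :: rest, parent =>
    if state = goal then pvRecon parent parent.size state []
    else
      let step := (PySem.List.pyRange 0 (state.length : Int) 1).foldl (pvStepB state) (rest, parent)
      pvBfsB goal fuel step.1 step.2

def solvePancakeSortUninformed_alt (input_array : List Int) : List String :=
  let start := input_array
  let goal := PySem.List.sorted input_array (fun x => x) false
  pvBfsB goal ((input_array.length + 1) ^ (input_array.length + 1))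
    [start] (PySem.Dict.ofList [(start, none)])

-- ===== PRECONDITION & SPEC =====
def Spec_solvePancakeSortUninformed (input_array : List Int) (out : List String) : Prop := out = solvePancakeSortUninformed_alt input_array
instance (input_array : List Int) (out : List String) : Decidable (Spec_solvePancakeSortUninformed input_array out) := by unfold Spec_solvePancakeSortUninformed; infer_instance

-- ===== CLAIM (what is proved, stated in full; the proofs are below) =====
def Claim_equal_solvePancakeSortUninformed : Prop := ∀ (input_array : List Int), Dom_solvePancakeSortUninformed input_array → Spec_solvePancakeSortUninformed input_array (solvePancakeSortUninformed input_array)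

-- ===== LEMMAS AND PROOFS =====

-- "parent records the flip sequence p for state s" (walking the pointers backwards)
inductive pvReconP (parent : PySem.Dict (List Int) (Option (List Int × String))) :
    List Int → List String → Prop
  | base (s : List Int) : parent.get? s = some none → pvReconP parent s []
  | step (s prev : List Int) (lab : String) (p : List String) :
      parent.get? s = some (some (prev, lab)) → pvReconP parent prev p →
      pvReconP parent s (p ++ [lab])

theorem pvRecon_eq (parent : PySem.Dict (List Int) (Option (List Int × String)))
    {s : List Int} {p : List String} (h : pvReconP parent s p) :
    ∀ (fuel : Nat), p.length < fuel → ∀ (labels : List String),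
      pvRecon parent fuel s labels = p ++ labels.reverse := by
  induction h with
  | base s hs =>
      intro fuel hf labels
      match fuel, hf with
      | fuel + 1, _ => simp [pvRecon, hs]
  | step s prev lab p hs _ ih =>
      intro fuel hf labels
      match fuel, hf with
      | fuel + 1, hf =>
          have : p.length < fuel := by simpa using Nat.lt_of_succ_lt_succ (by simpa using hf)
          simp [pvRecon, hs, ih fuel this (labels ++ [lab])]

theorem pvReconP_insert (parent : PySem.Dict (List Int) (Option (List Int × String)))
    {s : List Int} {p : List String} (h : pvReconP parent s p)
    (k : List Int) (v : Option (List Int × String)) (hk : parent.get? k = none) :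
    pvReconP (parent.insert k v) s p := by
  induction h with
  | base s hs =>
      exact pvReconP.base s (by
        rw [PySem.Dict.get?_insert_of_ne parent v (by rintro rfl; rw [hk] at hs; cases hs)]
        exact hs)
  | step s prev lab p hs _ ih =>
      exact pvReconP.step s prev lab p (by
        rw [PySem.Dict.get?_insert_of_ne parent v (by rintro rfl; rw [hk] at hs; cases hs)]
        exact hs) ih

-- the lockstep invariant between A's (queue, visited) and B's (queue of states, parent)
def pvInv (qa : List (List Int × List String)) (visited : PySem.Set (List Int))
    (parent : PySem.Dict (List Int) (Option (List Int × String))) : Prop :=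
  (∀ s : List Int, PySem.Set.contains visited s = parent.contains s) ∧
  (∀ sp ∈ qa, pvReconP parent sp.1 sp.2 ∧ sp.2.length < parent.size)

theorem pvFold_agree (state : List Int) (path : List String) :
    ∀ (l : List Int) (qa : List (List Int × List String)) (visited : PySem.Set (List Int))
      (parent : PySem.Dict (List Int) (Option (List Int × String))),
      pvInv qa visited parent →
      pvReconP parent state path → path.length < parent.size →
      (let ra := l.foldl (pvStepA state path) (qa, visited)
       let rb := l.foldl (pvStepB state) (qa.map Prod.fst, parent)
       ra.1.map Prod.fst = rb.1 ∧ pvInv ra.1 ra.2 rb.2 ∧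
         pvReconP rb.2 state path ∧ path.length < rb.2.size) := by
  intro l
  induction l with
  | nil =>
      intro qa visited parent hinv hsp hlen
      exact ⟨rfl, hinv, hsp, hlen⟩
  | cons i t ih =>
      intro qa visited parent hinv hsp hlen
      obtain ⟨h1, h2⟩ := hinv
      simp only [List.foldl_cons]
      by_cases hc : PySem.Set.contains visited (pvFlip state i) = true
      · have hcB : parent.contains (pvFlip state i) = true := (h1 _).symm.trans hc
        rw [show pvStepA state path (qa, visited) i = (qa, visited) by
              simp only [pvStepA]; rw [if_pos hc],
            show pvStepB state (qa.map Prod.fst, parent) i = (qa.map Prod.fst, parent) by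
              simp only [pvStepB]
              rw [show (PySem.List.slice state none (some (i + 1))).reverse ++
                    PySem.List.slice state (some (i + 1)) none = pvFlip state i from rfl]
              rw [if_pos hcB]]
        exact ih qa visited parent ⟨h1, h2⟩ hsp hlen
      · have hc' : PySem.Set.contains visited (pvFlip state i) = false := by simpa using hc
        have hcB : parent.contains (pvFlip state i) = false := (h1 _).symm.trans hc'
        have hget : parent.get? (pvFlip state i) = none :=
          (PySem.Dict.get?_eq_none_iff_contains _ _).mpr hcB
        have hsize : (parent.insert (pvFlip state i)
            (some (state, "flip_" ++ PySem.Int.toStr i))).size = parent.size + 1 := by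
          rw [PySem.Dict.size_insert]; simp [hcB]
        have hnotmem : pvFlip state i ∉ visited := by
          intro hm; rw [(PySem.Set.contains_iff _ _).mpr hm] at hc'; cases hc'
        rw [show pvStepA state path (qa, visited) i
              = (qa ++ [(pvFlip state i, path ++ ["flip_" ++ PySem.Int.toStr i])],
                 visited ++ [pvFlip state i]) by
              simp only [pvStepA]; rw [if_neg (by simp [PySem.Set.contains_eq_listContains, hnotmem])]
              simp [PySem.Set.add_of_not_mem hnotmem],
            show pvStepB state (qa.map Prod.fst, parent) i
              = (qa.map Prod.fst ++ [pvFlip state i],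
                 parent.insert (pvFlip state i) (some (state, "flip_" ++ PySem.Int.toStr i))) by
              simp only [pvStepB]
              rw [show (PySem.List.slice state none (some (i + 1))).reverse ++
                    PySem.List.slice state (some (i + 1)) none = pvFlip state i from rfl]
              rw [if_neg (by simp [hcB])]]
        have hinv' : pvInv (qa ++ [(pvFlip state i, path ++ ["flip_" ++ PySem.Int.toStr i])])
            (visited ++ [pvFlip state i])
            (parent.insert (pvFlip state i) (some (state, "flip_" ++ PySem.Int.toStr i))) := by
          constructor
          · intro s
            rw [PySem.Dict.contains_insert]
            by_cases hs : s = pvFlip state i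
            · subst hs
              simp [PySem.Set.contains_eq_listContains]
            · have hb : (s == pvFlip state i) = false := by simp [hs]
              rw [hb, Bool.false_or, ← h1 s]
              simp [PySem.Set.contains_eq_listContains, hs]
          · intro sp hsp'
            rcases List.mem_append.mp hsp' with hmem | hmem
            · obtain ⟨hr, hl⟩ := h2 sp hmem
              exact ⟨pvReconP_insert parent hr _ _ hget, by rw [hsize]; omega⟩
            · rcases List.mem_singleton.mp hmem with rfl
              refine ⟨pvReconP.step _ state _ path (PySem.Dict.get?_insert_self _ _ _)
                        (pvReconP_insert parent hsp _ _ hget), ?_⟩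
              rw [hsize]; simp; omega
        have hres := ih _ _ _ hinv' (pvReconP_insert parent hsp _ _ hget)
          (by rw [hsize]; omega)
        simpa using hres

theorem pvBfs_agree (goal : List Int) :
    ∀ (fuel : Nat) (qa : List (List Int × List String)) (visited : PySem.Set (List Int))
      (parent : PySem.Dict (List Int) (Option (List Int × String))),
      pvInv qa visited parent →
      pvBfsA goal fuel qa visited = pvBfsB goal fuel (qa.map Prod.fst) parent := by
  intro fuel
  induction fuel with
  | zero =>
      intro qa visited parent _
      simp [pvBfsA, pvBfsB]
  | succ fuel ih =>
      intro qa visited parent hinv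
      match qa with
      | [] => simp [pvBfsA, pvBfsB]
      | (state, path) :: rest =>
          obtain ⟨h1, h2⟩ := hinv
          obtain ⟨hr, hl⟩ := h2 (state, path) (List.mem_cons_self)
          simp only [List.map_cons]
          simp only [pvBfsA, pvBfsB]
          by_cases hgoal : state = goal
          · rw [if_pos hgoal, if_pos hgoal]
            rw [pvRecon_eq parent hr parent.size hl []]
            simp
          · rw [if_neg hgoal, if_neg hgoal]
            have hrest : pvInv rest visited parent :=
              ⟨h1, fun sp h => h2 sp (List.mem_cons_of_mem _ h)⟩
            obtain ⟨hmap, hinv', _, _⟩ :=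
              pvFold_agree state path (PySem.List.pyRange 0 (state.length : Int) 1)
                rest visited parent hrest hr hl
            rw [← hmap]
            exact ih _ _ _ hinv' 

-- ===== VERDICT (by name: the statement is the Claim_ definition above) =====
theorem solvePancakeSortUninformed_spec : Claim_equal_solvePancakeSortUninformed := by
  intro input_array _
  unfold Spec_solvePancakeSortUninformed solvePancakeSortUninformed solvePancakeSortUninformed_alt
  apply pvBfs_agree
  constructor
  · intro s
    simp [PySem.Set.contains_eq_listContains, PySem.Dict.ofList, PySem.Dict.update,
      PySem.Dict.contains_insert, beq_eq_decide]
  · intro sp hsp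
    rcases List.mem_singleton.mp hsp with rfl
    refine ⟨pvReconP.base _ ?_, ?_⟩
    · simp [PySem.Dict.ofList, PySem.Dict.update, PySem.Dict.get?_insert_self]
    · simp [PySem.Dict.ofList, PySem.Dict.update, PySem.Dict.size_insert,
        PySem.Dict.contains_empty, PySem.Dict.size_empty]
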